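-- pv_equiv track=rewrite | github.com/igorworkman/Uniclon_bot | modules/utils/video_tools.py | _pick_lut_descriptor
-- ===== SOURCE A (Python) =====
-- from typing import Dict, Iterable, List, Optional
--
-- def _pick_lut_descriptor(filters: Iterable[str]) -> Optional[str]:
--     if not filters:
--         return None
--     if any("colorbalance" in f or "colorchannelmixer" in f for f in filters):
--         return "ColorMatrix"
--     if any("curves" in f for f in filters):
--         return "CurvesLUT"
--     if any("gblur" in f or "avgblur" in f for f in filters):
--         return "SoftBlur"
--     return None
-- ===== SOURCE B (Python) =====
-- from typing import Iterable, Optional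
--
-- def _pick_lut_descriptor(filters: Iterable[str]) -> Optional[str]:
--     if not filters:
--         return None
--     has_matrix = has_curves = has_blur = False
--     for f in filters:
--         if "colorbalance" in f or "colorchannelmixer" in f:
--             has_matrix = True
--         if "curves" in f:
--             has_curves = True
--         if "gblur" in f or "avgblur" in f:
--             has_blur = True
--     if has_matrix:
--         return "ColorMatrix"
--     if has_curves:
--         return "CurvesLUT"
--     if has_blur:
--         return "SoftBlur"
--     return None
-- ===== Notes on version B (the rewrite author's own statement) =====
-- stated objective: alternative
-- what changed: Replaces three priority-ordered whole-list any() scans with a single pass that accumulates three booleans and applies the priority after the loop.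
import Mathlib
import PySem

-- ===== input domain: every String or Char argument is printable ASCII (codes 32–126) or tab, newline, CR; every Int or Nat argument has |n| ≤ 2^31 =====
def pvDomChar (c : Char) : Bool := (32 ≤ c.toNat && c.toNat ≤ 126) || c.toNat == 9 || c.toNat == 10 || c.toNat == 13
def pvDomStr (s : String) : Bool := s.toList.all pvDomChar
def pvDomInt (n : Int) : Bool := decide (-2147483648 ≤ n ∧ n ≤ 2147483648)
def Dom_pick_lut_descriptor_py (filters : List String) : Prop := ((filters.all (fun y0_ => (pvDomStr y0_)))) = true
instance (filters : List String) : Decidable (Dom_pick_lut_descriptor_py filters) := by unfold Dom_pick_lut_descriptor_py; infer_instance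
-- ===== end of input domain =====

-- B replaces A's three priority-ordered whole-list scans with one pass that
-- accumulates three booleans and applies the priority after the loop (alternative decomposition).


-- ===== PORT A =====
def pick_lut_descriptor_py (filters : List String) : Option String :=
  if filters.isEmpty then none
  else if filters.any (fun f => PySem.Str.isIn "colorbalance" f || PySem.Str.isIn "colorchannelmixer" f) then some "ColorMatrix"
  else if filters.any (fun f => PySem.Str.isIn "curves" f) then some "CurvesLUT"
  else if filters.any (fun f => PySem.Str.isIn "gblur" f || PySem.Str.isIn "avgblur" f) then some "SoftBlur"
  else none

-- ===== PORT B =====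
def pick_lut_descriptor_py_alt (filters : List String) : Option String :=
  if filters.isEmpty then none
  else
    let st := filters.foldl
      (fun (st : Bool × Bool × Bool) f =>
        (st.1 || (PySem.Str.isIn "colorbalance" f || PySem.Str.isIn "colorchannelmixer" f),
         st.2.1 || PySem.Str.isIn "curves" f,
         st.2.2 || (PySem.Str.isIn "gblur" f || PySem.Str.isIn "avgblur" f)))
      (false, false, false)
    if st.1 then some "ColorMatrix"
    else if st.2.1 then some "CurvesLUT"
    else if st.2.2 then some "SoftBlur"
    else none

-- ===== PRECONDITION & SPEC =====
def Spec_pick_lut_descriptor_py (filters : List String) (out : Option String) : Prop := out = pick_lut_descriptor_py_alt filters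
instance (filters : List String) (out : Option String) : Decidable (Spec_pick_lut_descriptor_py filters out) := by unfold Spec_pick_lut_descriptor_py; infer_instance

-- ===== CLAIM (what is proved, stated in full; the proofs are below) =====
def Claim_equal_pick_lut_descriptor_py : Prop := ∀ (filters : List String), Dom_pick_lut_descriptor_py filters → Spec_pick_lut_descriptor_py filters (pick_lut_descriptor_py filters)

-- ===== LEMMAS AND PROOFS =====

-- The one-pass fold computes exactly the three `any` scans (or-accumulated onto the start state).
theorem pickLut_foldl_eq (xs : List String) (a b c : Bool) :
    xs.foldl
      (fun (st : Bool × Bool × Bool) f =>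
        (st.1 || (PySem.Str.isIn "colorbalance" f || PySem.Str.isIn "colorchannelmixer" f),
         st.2.1 || PySem.Str.isIn "curves" f,
         st.2.2 || (PySem.Str.isIn "gblur" f || PySem.Str.isIn "avgblur" f)))
      (a, b, c)
    = (a || xs.any (fun f => PySem.Str.isIn "colorbalance" f || PySem.Str.isIn "colorchannelmixer" f),
       b || xs.any (fun f => PySem.Str.isIn "curves" f),
       c || xs.any (fun f => PySem.Str.isIn "gblur" f || PySem.Str.isIn "avgblur" f)) := by
  induction xs generalizing a b c with
  | nil => simp
  | cons x xs ih =>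
    rw [List.foldl_cons, ih]
    simp [Bool.or_assoc]

-- ===== VERDICT (by name: the statement is the Claim_ definition above) =====
theorem pick_lut_descriptor_py_spec : Claim_equal_pick_lut_descriptor_py := by
  intro filters _
  unfold Spec_pick_lut_descriptor_py pick_lut_descriptor_py pick_lut_descriptor_py_alt
  rw [pickLut_foldl_eq]
  simp
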